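-- pv_equiv track=rewrite | github.com/Kohdz/Algorithms | AmazonOA/movieOnFlight.py | flightDetails
-- ===== SOURCE A (Python) =====
-- def flightDetails(arr, k):
--     k -= 30
--     arr = sorted(arr)
--     left = 0
--     right = len(arr)-1
--     max_val = 0
--     while left < right:
--         if arr[left]+arr[right] <= k:
--             if max_val < arr[left]+arr[right]:
--                 max_val = arr[left]+arr[right]
--                 i = left
--                 j = right
--             left += 1
--         else:
--             right -= 1
--     return(arr[i], arr[j])
-- ===== SOURCE B (Python) =====
-- def flightDetails(arr, k):
--     k -= 30
--     arr = sorted(arr)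
--     n = len(arr)
--     max_val = 0
--     for left in range(n):
--         for right in range(n - 1, left, -1):
--             s = arr[left] + arr[right]
--             if s <= k:
--                 if s > max_val:
--                     max_val = s
--                     i, j = left, right
--                 break
--     return (arr[i], arr[j])
-- ===== Notes on version B (the rewrite author's own statement) =====
-- stated objective: alternative
-- what changed: Replaces the shared two-pointer sweep by a per-element scan: for each left index, scan right indices downward and take the first (largest) partner whose sum fits, keeping the best pair seen; no shared moving right pointer and no early loop exit.
import Mathlib
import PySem

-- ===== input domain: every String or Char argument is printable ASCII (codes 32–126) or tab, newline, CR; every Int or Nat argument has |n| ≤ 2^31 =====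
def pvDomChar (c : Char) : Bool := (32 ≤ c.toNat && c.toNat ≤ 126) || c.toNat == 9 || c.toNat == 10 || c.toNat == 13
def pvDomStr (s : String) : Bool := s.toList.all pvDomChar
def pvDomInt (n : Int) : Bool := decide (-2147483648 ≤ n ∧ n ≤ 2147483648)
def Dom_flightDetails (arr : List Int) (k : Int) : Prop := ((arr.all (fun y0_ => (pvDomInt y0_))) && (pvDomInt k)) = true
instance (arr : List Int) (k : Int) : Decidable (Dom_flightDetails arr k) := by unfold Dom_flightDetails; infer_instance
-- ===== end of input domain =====

-- B replaces A's shared two-pointer sweep by a per-left downward scan for the largest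
-- fitting partner (alternative algorithm, not faster); return values agree wherever A returns.

-- arr[i] (index always in range on the reachable states of both loops; default never used there)
def fdGet (s : List Int) (i : Int) : Int := (PySem.List.pyGet? s i).getD 0

-- ===== PORT A =====
-- the while loop of A: state (left, right, max_val, best); best = none models unbound i, j
def fdTp (s : List Int) (K : Int) (l r : Int) (m : Int) (best : Option (Int × Int)) :
    Option (Int × Int) :=
  if h : l < r then
    let t := fdGet s l + fdGet s r
    if t ≤ K then
      if m < t then fdTp s K (l + 1) r t (some (l, r))
      else fdTp s K (l + 1) r m best
    else fdTp s K l (r - 1) m best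
  else best
termination_by (r - l).toNat
decreasing_by all_goals omega

def flightDetails (arr : List Int) (k : Int) : Int × Int :=
  let K := k - 30
  let s := PySem.List.sorted arr (fun x => x) false
  match fdTp s K 0 ((s.length : Int) - 1) 0 none with
  | some (i, j) => (fdGet s i, fdGet s j)
  | none => (0, 0)   -- Python raises UnboundLocalError here; excluded by Pre_

-- ===== PORT B =====
-- the inner 'for right in range(n-1, left, -1): … break' of B: stops at the first fitting sum
def fdInner (s : List Int) (K : Int) (l : Int) (r : Int) (m : Int) (best : Option (Int × Int)) :
    Int × Option (Int × Int) :=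
  if h : l < r then
    let t := fdGet s l + fdGet s r
    if t ≤ K then
      (if t > m then (t, some (l, r)) else (m, best))   -- then break
    else fdInner s K l (r - 1) m best
  else (m, best)
termination_by (r - l).toNat
decreasing_by omega

-- the outer 'for left in range(n)' of B
def fdOuter (s : List Int) (K : Int) (l : Int) (m : Int) (best : Option (Int × Int)) :
    Option (Int × Int) :=
  if h : l < (s.length : Int) then
    let p := fdInner s K l ((s.length : Int) - 1) m best
    fdOuter s K (l + 1) p.1 p.2
  else best
termination_by ((s.length : Int) - l).toNat
decreasing_by omega

def flightDetails_alt (arr : List Int) (k : Int) : Int × Int :=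
  let K := k - 30
  let s := PySem.List.sorted arr (fun x => x) false
  match fdOuter s K 0 0 none with
  | some (i, j) => (fdGet s i, fdGet s j)
  | none => (0, 0)   -- Python raises UnboundLocalError here; excluded by Pre_

-- ===== PRECONDITION & SPEC =====
-- Pre_ excludes exactly the inputs (no two distinct positions with 0 < sum ≤ k-30) on which
-- Python A's i, j stay unbound and A raises UnboundLocalError; B raises there too.
def Pre_flightDetails (arr : List Int) (k : Int) : Prop :=
  ∃ p q : Fin arr.length, p ≠ q ∧ 0 < arr.get p + arr.get q ∧ arr.get p + arr.get q ≤ k - 30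
instance (arr : List Int) (k : Int) : Decidable (Pre_flightDetails arr k) := by
  unfold Pre_flightDetails; infer_instance
def pvWitness_flightDetails : List Int × Int := ([5, 10], 50)

def Spec_flightDetails (arr : List Int) (k : Int) (out : Int × Int) : Prop := out = flightDetails_alt arr k
instance (arr : List Int) (k : Int) (out : Int × Int) : Decidable (Spec_flightDetails arr k out) := by unfold Spec_flightDetails; infer_instance

-- ===== CLAIM (what is proved, stated in full; the proofs are below) =====
def Claim_equal_flightDetails : Prop := ∀ (arr : List Int) (k : Int), Dom_flightDetails arr k → Pre_flightDetails arr k → Spec_flightDetails arr k (flightDetails arr k)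

-- ===== LEMMAS AND PROOFS =====

theorem fdGet_mono (s : List Int) (hs : s.Pairwise (· ≤ ·)) (i j : Int)
    (h0 : 0 ≤ i) (hij : i ≤ j) (hj : j < (s.length : Int)) : fdGet s i ≤ fdGet s j := by
  have hi' : i.toNat < s.length := by omega
  have hj' : j.toNat < s.length := by omega
  have gi : fdGet s i = s[i.toNat] := by
    simp [fdGet, PySem.List.pyGet?_eq_some_getElem (xs := s) (i := i) h0 (by omega)]
  have gj : fdGet s j = s[j.toNat] := by
    simp [fdGet, PySem.List.pyGet?_eq_some_getElem (xs := s) (i := j) (by omega) (by omega)]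
  rw [gi, gj]
  rcases Nat.eq_or_lt_of_le (show i.toNat ≤ j.toNat by omega) with h | h
  · simp [h]
  · exact List.pairwise_iff_getElem.mp hs i.toNat j.toNat hi' hj' h

-- inner scan: while every index above r fails, the scan passes it
theorem fdInner_skip (s : List Int) (K l r start m : Int) (best : Option (Int × Int))
    (hr : r ≤ start)
    (hfail : ∀ r', r < r' → r' ≤ start → fdGet s l + fdGet s r' > K) :
    fdInner s K l start m best = fdInner s K l r m best := by
  rcases eq_or_lt_of_le hr with h | h
  · rw [h]
  · by_cases hl : l < start
    · rw [fdInner, dif_pos hl]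
      simp only
      rw [if_neg (by have := hfail start h (le_refl _); omega)]
      exact fdInner_skip s K l r (start - 1) m best (by omega)
        (fun r' h1 h2 => hfail r' h1 (by omega))
    · rw [fdInner, dif_neg hl, fdInner, dif_neg (by omega : ¬ l < r)]
termination_by (start - r).toNat
decreasing_by omega

-- inner scan where everything fails: state unchanged
theorem fdInner_none (s : List Int) (K l start m : Int) (best : Option (Int × Int))
    (hfail : ∀ r', l < r' → r' ≤ start → fdGet s l + fdGet s r' > K) :
    fdInner s K l start m best = (m, best) := by
  rw [fdInner]
  split
  · next h =>
    simp only
    rw [if_neg (by have := hfail start h (le_refl _); omega)]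
    exact fdInner_none s K l (start - 1) m best (fun r' h1 h2 => hfail r' h1 (by omega))
  · rfl
termination_by (start - l).toNat
decreasing_by omega

-- outer tail once every partner of ρ (hence of every later left) fails: best unchanged
theorem fdOuter_tail (s : List Int) (hs : s.Pairwise (· ≤ ·)) (K ρ l m : Int)
    (best : Option (Int × Int)) (h0 : 0 ≤ ρ) (hl : ρ ≤ l)
    (hfail : ∀ r', ρ < r' → r' < (s.length : Int) → fdGet s ρ + fdGet s r' > K) :
    fdOuter s K l m best = best := by
  rw [fdOuter]
  split
  · next h =>
    have hinner : fdInner s K l ((s.length : Int) - 1) m best = (m, best) := by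
      apply fdInner_none
      intro r' h1 h2
      have h3 : fdGet s ρ + fdGet s r' > K := hfail r' (by omega) (by omega)
      have h4 := fdGet_mono s hs ρ l h0 hl (by omega)
      omega
    simp only [hinner]
    exact fdOuter_tail s hs K ρ (l + 1) m best h0 (by omega) hfail
  · rfl
termination_by ((s.length : Int) - l).toNat
decreasing_by omega

-- MAIN: the two-pointer loop from (l, r) equals B's remaining outer loop from l,
-- given that all partners above r already fail for l (hence for every later left).
theorem fd_main (s : List Int) (hs : s.Pairwise (· ≤ ·)) (K l r m : Int)
    (best : Option (Int × Int)) (h0 : 0 ≤ l) (hlr : l ≤ r) (hr : r ≤ (s.length : Int) - 1)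
    (hfail : ∀ r', r < r' → r' < (s.length : Int) → fdGet s l + fdGet s r' > K) :
    fdTp s K l r m best = fdOuter s K l m best := by
  rw [fdTp]
  split
  · next hlt =>
    simp only
    by_cases ht : fdGet s l + fdGet s r ≤ K
    · -- left moves; B's inner scan hits exactly the pair (l, r)
      have hinner : fdInner s K l ((s.length : Int) - 1) m best
          = (if fdGet s l + fdGet s r > m then (fdGet s l + fdGet s r, some (l, r))
             else (m, best)) := by
        rw [fdInner_skip s K l r ((s.length : Int) - 1) m best (by omega)
          (fun r' h1 h2 => hfail r' h1 (by omega))]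
        rw [fdInner, dif_pos hlt]
        simp only
        rw [if_pos ht]
      have hfail' : ∀ r', r < r' → r' < (s.length : Int) →
          fdGet s (l + 1) + fdGet s r' > K := by
        intro r' h1 h2
        have h3 := fdGet_mono s hs l (l + 1) h0 (by omega) (by omega)
        have h4 := hfail r' h1 h2
        omega
      rw [if_pos ht, fdOuter, dif_pos (by omega : l < (s.length : Int))]
      simp only [hinner]
      by_cases hm : m < fdGet s l + fdGet s r
      · rw [if_pos hm]
        simp only [if_pos (show fdGet s l + fdGet s r > m from hm)]
        exact fd_main s hs K (l + 1) r _ _ (by omega) (by omega) hr hfail'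
      · rw [if_neg hm]
        simp only [if_neg (show ¬ fdGet s l + fdGet s r > m from hm)]
        exact fd_main s hs K (l + 1) r m best (by omega) (by omega) hr hfail'
    · -- right moves; B's state and position are unchanged
      rw [if_neg ht]
      apply fd_main s hs K l (r - 1) m best h0 (by omega) (by omega)
      intro r' h1 h2
      rcases eq_or_lt_of_le (show r ≤ r' by omega) with h | h
      · rw [← h]; omega
      · exact hfail r' h h2
  · next hlt =>
    symm
    exact fdOuter_tail s hs K l l m best h0 (le_refl _)
      (fun r' h1 h2 => hfail r' (by omega) h2)
termination_by ((r - l) + ((s.length : Int) - l)).toNat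
decreasing_by all_goals omega

theorem flightDetails_eq (arr : List Int) (k : Int) :
    flightDetails arr k = flightDetails_alt arr k := by
  simp only [flightDetails, flightDetails_alt]
  have hs : (PySem.List.sorted arr (fun x => x) false).Pairwise (· ≤ ·) := by
    simpa using PySem.List.sorted_pairwise (xs := arr) (key := fun x => x)
  rcases Nat.eq_zero_or_pos (PySem.List.sorted arr (fun x => x) false).length with h0 | h0
  · rw [fdTp, fdOuter, dif_neg (by omega), dif_neg (by omega)]
  · rw [fd_main (PySem.List.sorted arr (fun x => x) false) hs (k - 30) 0
      (((PySem.List.sorted arr (fun x => x) false).length : Int) - 1) 0 none (by omega)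
      (by omega) (le_refl _) (by intro r' h1 h2; omega)]

-- ===== VERDICT (by name: the statement is the Claim_ definition above) =====
theorem flightDetails_spec : Claim_equal_flightDetails := by
  intro arr k _ _
  unfold Spec_flightDetails
  exact flightDetails_eq arr k
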